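-- pv_equiv track=rewrite | github.com/valentinborys/Education | Automation/eth.py | abandoned_now
-- ===== SOURCE A (Python) =====
-- def abandoned_now(dictionary, now):
--     investing_sum = [6600]
--     for key in dictionary:
--         if key == now:
--             investing_sum.append(dictionary[key])
--             break
--         investing_sum.append(dictionary[key])
--     return sum(investing_sum)
-- ===== SOURCE B (Python) =====
-- def abandoned_now(dictionary, now):
--     keys = list(dictionary)
--     if now in dictionary:
--         end = keys.index(now) + 1
--     else:
--         end = len(keys)
--     return sum((dictionary[k] for k in keys[:end]), 6600)
-- ===== Notes on version B (the rewrite author's own statement) =====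
-- stated objective: simpler
-- what changed: Replaces A's accumulate-into-a-list-with-early-break loop by locating the cutoff index of `now` once and summing the prefix slice of keys in one expression.
import Mathlib
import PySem

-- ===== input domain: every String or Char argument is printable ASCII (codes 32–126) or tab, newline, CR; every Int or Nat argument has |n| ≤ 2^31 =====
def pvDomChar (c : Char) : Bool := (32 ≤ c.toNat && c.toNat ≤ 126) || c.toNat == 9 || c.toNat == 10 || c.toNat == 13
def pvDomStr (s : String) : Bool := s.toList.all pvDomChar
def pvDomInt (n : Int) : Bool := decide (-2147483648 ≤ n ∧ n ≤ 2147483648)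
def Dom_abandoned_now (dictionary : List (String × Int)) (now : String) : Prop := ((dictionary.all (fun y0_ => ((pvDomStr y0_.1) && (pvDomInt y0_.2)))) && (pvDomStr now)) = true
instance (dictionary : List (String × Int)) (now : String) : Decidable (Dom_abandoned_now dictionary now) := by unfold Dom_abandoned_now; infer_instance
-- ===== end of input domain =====

-- B replaces A's accumulate-with-early-break loop by locating the cutoff index of
-- `now` once and summing the prefix of keys up to it (objective: simpler).


-- ===== PORT A =====
-- 'for key in dictionary: if key == now: append dictionary[key]; break; append dictionary[key]'
def aLoop (d : PySem.Dict String Int) (now : String) : List String → List Int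
  | [] => []
  | k :: rest =>
      if k == now then [d.getD k 0]
      else d.getD k 0 :: aLoop d now rest

def abandoned_now (dictionary : List (String × Int)) (now : String) : Int :=
  let d := PySem.Dict.ofList dictionary
  (6600 :: aLoop d now d.keys).sum

-- ===== PORT B =====
-- end = keys.index(now) + 1 if now in dictionary else len(keys)
def bCutoff (keys : List String) (now : String) : Nat :=
  match PySem.List.index? keys now with
  | some i => i + 1
  | none => keys.length

def abandoned_now_alt (dictionary : List (String × Int)) (now : String) : Int :=
  let d := PySem.Dict.ofList dictionary
  let keys := d.keys
  6600 + ((PySem.List.slice keys none (some (bCutoff keys now : Int))).map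
            (fun k => d.getD k 0)).sum

-- ===== PRECONDITION & SPEC =====
def Spec_abandoned_now (dictionary : List (String × Int)) (now : String) (out : Int) : Prop := out = abandoned_now_alt dictionary now
instance (dictionary : List (String × Int)) (now : String) (out : Int) : Decidable (Spec_abandoned_now dictionary now out) := by unfold Spec_abandoned_now; infer_instance

-- ===== CLAIM (what is proved, stated in full; the proofs are below) =====
def Claim_equal_abandoned_now : Prop := ∀ (dictionary : List (String × Int)) (now : String), Dom_abandoned_now dictionary now → Spec_abandoned_now dictionary now (abandoned_now dictionary now)

-- ===== LEMMAS AND PROOFS =====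
theorem aLoop_eq_take (d : PySem.Dict String Int) (now : String) :
    ∀ ks : List String,
      (aLoop d now ks).sum = ((ks.take (bCutoff ks now)).map (fun k => d.getD k 0)).sum := by
  intro ks
  induction ks with
  | nil => simp [aLoop, bCutoff]
  | cons k rest ih =>
      by_cases h : k = now
      · subst h
        rw [show bCutoff (k :: rest) k = 1 by
              rw [bCutoff, PySem.List.index?_cons_self]]
        simp [aLoop]
      · have hne : (k == now) = false := by simp [h]
        have hcut : bCutoff (k :: rest) now = bCutoff rest now + 1 := by
          rw [bCutoff, bCutoff, PySem.List.index?_cons_of_ne]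
          · cases PySem.List.index? rest now <;> simp
          · exact h
        rw [hcut]
        simp [aLoop, hne, ih]

-- ===== VERDICT (by name: the statement is the Claim_ definition above) =====
theorem abandoned_now_spec : Claim_equal_abandoned_now := by
  intro dictionary now _
  unfold Spec_abandoned_now abandoned_now abandoned_now_alt
  simp only [PySem.List.slice_to_natCast]
  rw [List.sum_cons, aLoop_eq_take]
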